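-- pv_equiv track=rewrite | github.com/sheetal-mehta/Ai-Based-language-learning-system | frontend/allo_inference.py | compare_and_highlight
-- ===== SOURCE A (Python) =====
-- def compare_and_highlight(list1, list2):
--     # Determine the length of the longer list
--     max_length = max(len(list1), len(list2))
--
--     # Initialize the highlighted results
--     highlighted_list1 = []
--     highlighted_list2 = []
--
--     # Iterate over both lists and compare phonemes
--     for i in range(max_length):
--         if i < len(list1) and i < len(list2):
--             if list1[i] == list2[i]:
--                 highlighted_list1.append(list1[i])
--                 highlighted_list2.append(list2[i])
--             else:
--                 highlighted_list1.append(f'<span style="color:green">{list1[i]}</span>')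
--                 highlighted_list2.append(f'<span style="color:red">{list2[i]}</span>')
--         elif i < len(list1):
--             highlighted_list1.append(f'<span style="color:green">{list1[i]}</span>')
--         elif i < len(list2):
--             highlighted_list2.append(f'<span style="color:red">{list2[i]}</span>')
--
--     return ' '.join(highlighted_list1), ' '.join(highlighted_list2)
-- ===== SOURCE B (Python) =====
-- def compare_and_highlight(list1, list2):
--     # Each output is computed independently by one symmetric helper pass:
--     # a token stays plain iff the reference list has the same element at that
--     # position (checked with a one-element slice), else it is wrapped in a span.
--     def hl(src, ref, color):
--         return ' '.join(
--             x if ref[i:i + 1] == [x] else f'<span style="color:{color}">{x}</span>'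
--             for i, x in enumerate(src)
--         )
--     return hl(list1, list2, 'green'), hl(list2, list1, 'red')
-- ===== Notes on version B (the rewrite author's own statement) =====
-- stated objective: alternative
-- what changed: Instead of A's single loop that builds both outputs together under index guards, B computes each output independently by two applications of one symmetric helper: a per-element pass over the source list that compares a one-element slice of the reference list to decide plain token vs coloured span.
import Mathlib
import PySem

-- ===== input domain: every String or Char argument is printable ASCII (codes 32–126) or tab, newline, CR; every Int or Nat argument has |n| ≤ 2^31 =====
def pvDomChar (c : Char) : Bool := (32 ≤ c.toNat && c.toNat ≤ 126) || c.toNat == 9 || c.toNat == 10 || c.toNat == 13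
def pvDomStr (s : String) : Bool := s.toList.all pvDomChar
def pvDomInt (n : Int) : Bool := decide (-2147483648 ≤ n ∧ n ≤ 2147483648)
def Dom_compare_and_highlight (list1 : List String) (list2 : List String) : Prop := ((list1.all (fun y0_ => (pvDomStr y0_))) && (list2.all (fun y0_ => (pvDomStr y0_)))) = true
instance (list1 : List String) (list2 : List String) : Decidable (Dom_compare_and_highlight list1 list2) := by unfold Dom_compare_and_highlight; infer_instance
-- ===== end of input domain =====

-- B computes each output independently with one symmetric helper (a per-element pass over the
-- source comparing a one-element slice of the reference), instead of A's single guarded loop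
-- building both outputs together (objective: alternative decomposition, same cost).

-- the f-string wrappers used by A's port
def pvGreen (s : String) : String := "<span style=\"color:green\">" ++ s ++ "</span>"
def pvRed (s : String) : String := "<span style=\"color:red\">" ++ s ++ "</span>"

-- ===== PORT A =====
-- A's loop body; the .getD "" is never taken: each branch's guard puts the index in range
def pvStepA (list1 list2 : List String) (acc : List String × List String) (i : Int) :
    List String × List String :=
  if i < (list1.length : Int) ∧ i < (list2.length : Int) then
    let a := (PySem.List.pyGet? list1 i).getD ""
    let b := (PySem.List.pyGet? list2 i).getD ""
    if a == b then (acc.1 ++ [a], acc.2 ++ [b])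
    else (acc.1 ++ [pvGreen a], acc.2 ++ [pvRed b])
  else if i < (list1.length : Int) then
    (acc.1 ++ [pvGreen ((PySem.List.pyGet? list1 i).getD "")], acc.2)
  else if i < (list2.length : Int) then
    (acc.1, acc.2 ++ [pvRed ((PySem.List.pyGet? list2 i).getD "")])
  else acc

def compare_and_highlight (list1 : List String) (list2 : List String) : String × String :=
  let maxLength : Nat := max list1.length list2.length
  let p := (PySem.List.pyRange 0 (maxLength : Int) 1).foldl (pvStepA list1 list2) ([], [])
  (PySem.Str.join " " p.1, PySem.Str.join " " p.2)

-- ===== PORT B =====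
-- the f-string of B's helper: the colour is interpolated
def pvSpan (color x : String) : String := "<span style=\"color:" ++ color ++ "\">" ++ x ++ "</span>"

-- B's helper hl(src, ref, color): ref[i:i+1] == [x] decides plain vs span
def pvHl (src ref : List String) (color : String) : String :=
  PySem.Str.join " " ((PySem.List.enumerate src 0).map (fun p =>
    if PySem.List.slice ref (some p.1) (some (p.1 + 1)) == [p.2] then p.2
    else pvSpan color p.2))

def compare_and_highlight_alt (list1 : List String) (list2 : List String) : String × String :=
  (pvHl list1 list2 "green", pvHl list2 list1 "red")

-- ===== PRECONDITION & SPEC =====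
def Spec_compare_and_highlight (list1 : List String) (list2 : List String) (out : String × String) : Prop := out = compare_and_highlight_alt list1 list2
instance (list1 : List String) (list2 : List String) (out : String × String) : Decidable (Spec_compare_and_highlight list1 list2 out) := by unfold Spec_compare_and_highlight; infer_instance

-- ===== CLAIM (what is proved, stated in full; the proofs are below) =====
def Claim_equal_compare_and_highlight : Prop := ∀ (list1 : List String) (list2 : List String), Dom_compare_and_highlight list1 list2 → Spec_compare_and_highlight list1 list2 (compare_and_highlight list1 list2)

-- ===== LEMMAS AND PROOFS =====

-- common specification: the two highlighted token lists, by structural recursion on both inputs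
def pvH : List String → List String → List String × List String
  | [], [] => ([], [])
  | x :: xs, [] => let r := pvH xs []; (pvGreen x :: r.1, r.2)
  | [], y :: ys => let r := pvH [] ys; (r.1, pvRed y :: r.2)
  | x :: xs, y :: ys =>
      let r := pvH xs ys
      if x == y then (x :: r.1, y :: r.2) else (pvGreen x :: r.1, pvRed y :: r.2)

lemma pvH_nil_right (l : List String) : pvH l [] = (l.map pvGreen, []) := by
  induction l with
  | nil => simp [pvH]
  | cons x xs ih => simp [pvH, ih]

lemma pvH_nil_left (l : List String) : pvH [] l = ([], l.map pvRed) := by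
  induction l with
  | nil => simp [pvH]
  | cons y ys ih => simp [pvH, ih]

lemma pyRange_shift (k : Nat) (a b : Int) (h : (b - a).toNat ≤ k) :
    PySem.List.pyRange (a + 1) (b + 1) 1 = (PySem.List.pyRange a b 1).map (· + 1) := by
  induction k generalizing a b with
  | zero =>
    have hba : b ≤ a := by omega
    rw [PySem.List.pyRange_one_eq_nil (by omega), PySem.List.pyRange_one_eq_nil hba]
    rfl
  | succ k ih =>
    by_cases hab : a < b
    · rw [PySem.List.pyRange_one_cons (by omega), PySem.List.pyRange_one_cons hab]
      simp [ih (a + 1) b (by omega)]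
    · rw [PySem.List.pyRange_one_eq_nil (by omega), PySem.List.pyRange_one_eq_nil (by omega)]
      rfl

lemma pvStepA_shift (l1 l2 : List String) (acc : List String × List String) (i : Int)
    (hi : 0 ≤ i) : pvStepA l1 l2 acc (i + 1) = pvStepA l1.tail l2.tail acc i := by
  obtain ⟨n, rfl⟩ := Int.eq_ofNat_of_zero_le hi
  have c0 : ¬((n : Int) + 1 < (0 : Int)) := by omega
  have c0' : ¬((n : Int) < (0 : Int)) := by omega
  cases l1 <;> cases l2 <;> simp [pvStepA, c0, c0']

lemma foldA_eq_pvH (n : Nat) (l1 l2 : List String) (acc : List String × List String)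
    (hn : n = max l1.length l2.length) :
    (PySem.List.pyRange 0 (n : Int) 1).foldl (pvStepA l1 l2) acc
      = (acc.1 ++ (pvH l1 l2).1, acc.2 ++ (pvH l1 l2).2) := by
  induction n generalizing l1 l2 acc with
  | zero =>
    have h1 : l1 = [] := by cases l1 with
      | nil => rfl
      | cons a as => exfalso; simp at hn; omega
    have h2 : l2 = [] := by cases l2 with
      | nil => rfl
      | cons a as => exfalso; simp at hn; omega
    subst h1; subst h2
    rw [PySem.List.pyRange_one_eq_nil (by omega)]
    simp [pvH]
  | succ n ih =>
    rw [PySem.List.pyRange_one_cons (by push_cast; omega)]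
    have hr : PySem.List.pyRange (0 + 1) ((n : Int) + 1) 1
        = (PySem.List.pyRange 0 (n : Int) 1).map (· + 1) :=
      pyRange_shift n 0 (n : Int) (by omega)
    have hcast : ((n + 1 : Nat) : Int) = (n : Int) + 1 := by push_cast; ring
    simp only [List.foldl_cons, hcast, hr, List.foldl_map]
    have hcong : ∀ (b : List String × List String),
        (PySem.List.pyRange 0 (n : Int) 1).foldl
          (fun a i => pvStepA l1 l2 a (i + 1)) b
        = (PySem.List.pyRange 0 (n : Int) 1).foldl (pvStepA l1.tail l2.tail) b := by
      intro b
      apply PySem.List.foldl_congr_mem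
      intro a i hi
      have := (PySem.List.mem_pyRange_one).mp hi
      exact pvStepA_shift l1 l2 a i (by omega)
    rw [hcong]
    cases l1 with
    | nil => cases l2 with
      | nil => simp at hn
      | cons y ys =>
        have hstep : pvStepA [] (y :: ys) acc 0 = (acc.1, acc.2 ++ [pvRed y]) := by
          simp [pvStepA]
        rw [hstep]
        simp only [List.tail_nil, List.tail_cons]
        rw [ih [] ys _ (by simp at hn ⊢; omega)]
        simp [pvH_nil_left]
    | cons x xs => cases l2 with
      | nil =>
        have hstep : pvStepA (x :: xs) [] acc 0 = (acc.1 ++ [pvGreen x], acc.2) := by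
          simp [pvStepA]
        rw [hstep]
        simp only [List.tail_nil, List.tail_cons]
        rw [ih xs [] _ (by simp at hn ⊢; omega)]
        simp [pvH_nil_right]
      | cons y ys =>
        have hstep : pvStepA (x :: xs) (y :: ys) acc 0
            = if x == y then (acc.1 ++ [x], acc.2 ++ [y])
              else (acc.1 ++ [pvGreen x], acc.2 ++ [pvRed y]) := by
          simp [pvStepA]
        rw [hstep]
        by_cases hxy : x == y
        · simp only [hxy, if_pos, List.tail_cons]
          rw [ih xs ys _ (by simp at hn ⊢; omega)]
          simp [pvH, hxy]
        · rw [if_neg hxy]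
          simp only [List.tail_cons]
          rw [ih xs ys _ (by simp at hn ⊢; omega)]
          simp [pvH, hxy]

lemma A_eq_pvH (l1 l2 : List String) :
    compare_and_highlight l1 l2
      = (PySem.Str.join " " (pvH l1 l2).1, PySem.Str.join " " (pvH l1 l2).2) := by
  show (PySem.Str.join " " ((PySem.List.pyRange 0 ((max l1.length l2.length : Nat) : Int) 1).foldl (pvStepA l1 l2) ([], [])).1,
        PySem.Str.join " " ((PySem.List.pyRange 0 ((max l1.length l2.length : Nat) : Int) 1).foldl (pvStepA l1 l2) ([], [])).2)
      = (PySem.Str.join " " (pvH l1 l2).1, PySem.Str.join " " (pvH l1 l2).2)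
  rw [foldA_eq_pvH (max l1.length l2.length) l1 l2 ([], []) rfl]
  simp

-- ----- B side -----

-- pvHl's token list, with the position argument replaced by the dropped reference list
def pvGog (f : String → String) : List String → List String → List String
  | [], _ => []
  | x :: xs, r => (if r.take 1 == [x] then x else f x) :: pvGog f xs r.tail

lemma pvGog_nil_ref (f : String → String) (l : List String) : pvGog f l [] = l.map f := by
  induction l with
  | nil => simp [pvGog]
  | cons x xs ih => simp [pvGog, ih]

lemma pvMapEnum (xs ref : List String) (c : String) (s : Nat) :
    (PySem.List.enumerate xs (s : Int)).map (fun p =>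
        if PySem.List.slice ref (some p.1) (some (p.1 + 1)) == [p.2] then p.2
        else pvSpan c p.2)
      = pvGog (pvSpan c) xs (ref.drop s) := by
  induction xs generalizing s with
  | nil => simp [PySem.List.enumerate_nil, pvGog]
  | cons x xs ih =>
    rw [PySem.List.enumerate_cons]
    simp only [List.map_cons]
    have h1 : ((s : Int) + 1) = (((s + 1 : Nat)) : Int) := by push_cast; ring
    have hslice : PySem.List.slice ref (some (s : Int)) (some ((s : Int) + 1))
        = (ref.drop s).take 1 := by
      have := PySem.List.slice_natCast_add ref s 1
      simpa using this
    have hdrop : ref.drop (s + 1) = (ref.drop s).tail := by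
      rw [← List.drop_drop, List.drop_one]
    have ihx : (PySem.List.enumerate xs ((s : Int) + 1)).map (fun p =>
        if PySem.List.slice ref (some p.1) (some (p.1 + 1)) == [p.2] then p.2
        else pvSpan c p.2) = pvGog (pvSpan c) xs (ref.drop s).tail := by
      rw [h1, ih (s + 1), hdrop]
    rw [ihx]
    simp [pvGog, hslice]

lemma pvSpan_green (x : String) : pvSpan "green" x = pvGreen x := rfl
lemma pvSpan_red (x : String) : pvSpan "red" x = pvRed x := rfl

lemma pvH_eq_gog (l1 l2 : List String) :
    pvH l1 l2 = (pvGog pvGreen l1 l2, pvGog pvRed l2 l1) := by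
  induction l1 generalizing l2 with
  | nil =>
    rw [pvH_nil_left, pvGog_nil_ref]
    simp [pvGog]
  | cons x xs ih =>
    cases l2 with
    | nil =>
      rw [pvH_nil_right, pvGog_nil_ref]
      simp [pvGog]
    | cons y ys =>
      by_cases h : x = y
      · subst h
        simp [pvH, pvGog, ih ys]
      · have h1 : (y == x) = false := by simpa using fun e => h e.symm
        have h2 : (x == y) = false := by simpa using h
        simp [pvH, pvGog, h1, h2, ih ys]

lemma B_eq_pvH (l1 l2 : List String) :
    compare_and_highlight_alt l1 l2
      = (PySem.Str.join " " (pvH l1 l2).1, PySem.Str.join " " (pvH l1 l2).2) := by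
  show (pvHl l1 l2 "green", pvHl l2 l1 "red") = _
  unfold pvHl
  have e0 : (0 : Int) = ((0 : Nat) : Int) := rfl
  rw [e0, pvMapEnum l1 l2 "green" 0, pvMapEnum l2 l1 "red" 0]
  simp only [List.drop_zero]
  have hg : pvSpan "green" = pvGreen := funext pvSpan_green
  have hr : pvSpan "red" = pvRed := funext pvSpan_red
  rw [hg, hr, pvH_eq_gog l1 l2]

-- ===== VERDICT (by name: the statement is the Claim_ definition above) =====
theorem compare_and_highlight_spec : Claim_equal_compare_and_highlight := by
  intro l1 l2 _
  unfold Spec_compare_and_highlight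
  rw [A_eq_pvH, B_eq_pvH]
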